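-- pv_equiv track=rewrite | github.com/andrewmarconi/portraits | portraits/generators/voice_original.py | unpack_snac_from_7
-- ===== SOURCE A (Python) =====
-- CODE_END_TOKEN_ID = 128258
--
-- CODE_TOKEN_OFFSET = 128266
--
-- SNAC_TOKENS_PER_FRAME = 7
--
-- def unpack_snac_from_7(snac_tokens: list[int]) -> list[list[int]]:
--     """
--     Unpack 7-token SNAC frames into 3 hierarchical levels.
--
--     SNAC uses a hierarchical encoding with 3 levels of audio codes.
--     Each frame contains 7 tokens that must be unpacked into these levels.
--
--     Args:
--         snac_tokens: List of SNAC token IDs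
--
--     Returns:
--         List containing 3 levels: [level1, level2, level3]
--     """
--     # Remove end token if present
--     if snac_tokens and snac_tokens[-1] == CODE_END_TOKEN_ID:
--         snac_tokens = snac_tokens[:-1]
--
--     frames = len(snac_tokens) // SNAC_TOKENS_PER_FRAME
--     snac_tokens = snac_tokens[: frames * SNAC_TOKENS_PER_FRAME]
--
--     if frames == 0:
--         return [[], [], []]
--
--     l1, l2, l3 = [], [], []
--
--     for i in range(frames):
--         slots = snac_tokens[i * 7 : (i + 1) * 7]
--         l1.append((slots[0] - CODE_TOKEN_OFFSET) % 4096)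
--         l2.extend([(slots[1] - CODE_TOKEN_OFFSET) % 4096, (slots[4] - CODE_TOKEN_OFFSET) % 4096])
--         l3.extend(
--             [
--                 (slots[2] - CODE_TOKEN_OFFSET) % 4096,
--                 (slots[3] - CODE_TOKEN_OFFSET) % 4096,
--                 (slots[5] - CODE_TOKEN_OFFSET) % 4096,
--                 (slots[6] - CODE_TOKEN_OFFSET) % 4096,
--             ]
--         )
--
--     return [l1, l2, l3]
-- ===== SOURCE B (Python) =====
-- CODE_END_TOKEN_ID = 128258
-- CODE_TOKEN_OFFSET = 128266
-- SNAC_TOKENS_PER_FRAME = 7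
--
-- def unpack_snac_from_7(snac_tokens: list[int]) -> list[list[int]]:
--     """Unpack 7-token SNAC frames into 3 hierarchical levels via strided slices."""
--     if snac_tokens and snac_tokens[-1] == CODE_END_TOKEN_ID:
--         snac_tokens = snac_tokens[:-1]
--     frames = len(snac_tokens) // SNAC_TOKENS_PER_FRAME
--     vals = [(t - CODE_TOKEN_OFFSET) % 4096 for t in snac_tokens[: frames * SNAC_TOKENS_PER_FRAME]]
--     l2 = [v for pair in zip(vals[1::7], vals[4::7]) for v in pair]
--     l3 = [v for quad in zip(vals[2::7], vals[3::7], vals[5::7], vals[6::7]) for v in quad]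
--     return [vals[0::7], l2, l3]
-- ===== Notes on version B (the rewrite author's own statement) =====
-- stated objective: alternative
-- what changed: Replaces A's per-frame loop that slices out 7 slots and scatters them into three growing accumulators by a single normalization pass over the truncated token list followed by strided slices (vals[k::7]) interleaved with zip, with no special-case for zero frames.
import Mathlib
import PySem

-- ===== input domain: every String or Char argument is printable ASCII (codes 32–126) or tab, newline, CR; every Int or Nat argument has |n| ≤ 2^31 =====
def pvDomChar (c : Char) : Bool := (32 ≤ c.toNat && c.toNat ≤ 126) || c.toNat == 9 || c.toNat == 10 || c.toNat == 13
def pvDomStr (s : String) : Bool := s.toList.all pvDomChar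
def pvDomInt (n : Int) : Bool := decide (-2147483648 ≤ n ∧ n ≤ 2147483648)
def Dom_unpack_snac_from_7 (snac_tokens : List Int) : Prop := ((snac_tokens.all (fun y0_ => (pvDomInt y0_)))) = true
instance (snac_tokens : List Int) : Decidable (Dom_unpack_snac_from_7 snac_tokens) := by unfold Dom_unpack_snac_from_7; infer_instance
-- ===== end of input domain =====

-- B replaces A's per-frame scatter loop by one normalization map followed by strided slices/zips
-- (objective: alternative decomposition, same cost); both programs only rebind the local list, no caller-visible mutation.

-- ===== PORT A =====
def unpack_snac_from_7 (snac_tokens : List Int) : List (List Int) :=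
  let t1 := if snac_tokens ≠ [] ∧ PySem.List.pyGetD snac_tokens (-1) 0 = 128258
            then PySem.List.slice snac_tokens none (some (-1)) else snac_tokens
  let frames : Int := PySem.Int.floordiv (t1.length : Int) 7
  let t2 := PySem.List.slice t1 none (some (frames * 7))
  if frames = 0 then [[], [], []]
  else
    let st := (PySem.List.pyRange 0 frames 1).foldl
      (fun (acc : List Int × List Int × List Int) i =>
        let slots := PySem.List.slice t2 (some (i * 7)) (some ((i + 1) * 7))
        (acc.1 ++ [PySem.Int.mod (PySem.List.pyGetD slots 0 0 - 128266) 4096],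
         acc.2.1 ++ [PySem.Int.mod (PySem.List.pyGetD slots 1 0 - 128266) 4096,
                     PySem.Int.mod (PySem.List.pyGetD slots 4 0 - 128266) 4096],
         acc.2.2 ++ [PySem.Int.mod (PySem.List.pyGetD slots 2 0 - 128266) 4096,
                     PySem.Int.mod (PySem.List.pyGetD slots 3 0 - 128266) 4096,
                     PySem.Int.mod (PySem.List.pyGetD slots 5 0 - 128266) 4096,
                     PySem.Int.mod (PySem.List.pyGetD slots 6 0 - 128266) 4096]))
      ([], [], [])
    [st.1, st.2.1, st.2.2]

-- ===== PORT B =====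
-- helper of B: the per-token normalization (t - CODE_TOKEN_OFFSET) % 4096
def pvNorm (t : Int) : Int := PySem.Int.mod (t - 128266) 4096
-- helper of B: vals[k::7] (step 7 is never 0, so the slice? is always 'some')
def pvStride (vals : List Int) (k : Int) : List Int :=
  (PySem.List.slice? vals (some k) none 7).getD []

def unpack_snac_from_7_alt (snac_tokens : List Int) : List (List Int) :=
  let t1 := if snac_tokens ≠ [] ∧ PySem.List.pyGetD snac_tokens (-1) 0 = 128258
            then PySem.List.slice snac_tokens none (some (-1)) else snac_tokens
  let frames : Int := PySem.Int.floordiv (t1.length : Int) 7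
  let vals := (PySem.List.slice t1 none (some (frames * 7))).map pvNorm
  let l2 := ((pvStride vals 1).zip (pvStride vals 4)).flatMap (fun p => [p.1, p.2])
  let l3 := ((pvStride vals 2).zip ((pvStride vals 3).zip ((pvStride vals 5).zip (pvStride vals 6)))).flatMap
              (fun q => [q.1, q.2.1, q.2.2.1, q.2.2.2])
  [pvStride vals 0, l2, l3]

-- ===== PRECONDITION & SPEC =====
def Spec_unpack_snac_from_7 (snac_tokens : List Int) (out : List (List Int)) : Prop := out = unpack_snac_from_7_alt snac_tokens
instance (snac_tokens : List Int) (out : List (List Int)) : Decidable (Spec_unpack_snac_from_7 snac_tokens out) := by unfold Spec_unpack_snac_from_7; infer_instance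

-- ===== CLAIM (what is proved, stated in full; the proofs are below) =====
def Claim_equal_unpack_snac_from_7 : Prop := ∀ (snac_tokens : List Int), Dom_unpack_snac_from_7 snac_tokens → Spec_unpack_snac_from_7 snac_tokens (unpack_snac_from_7 snac_tokens)

-- ===== LEMMAS AND PROOFS =====

-- reference decomposition: one pass over whole 7-chunks, used only by the proofs
def pvC1 : List Int → List Int
  | a :: _ :: _ :: _ :: _ :: _ :: _ :: rest => pvNorm a :: pvC1 rest
  | _ => []
def pvC2 : List Int → List Int
  | _ :: b :: _ :: _ :: e :: _ :: _ :: rest => pvNorm b :: pvNorm e :: pvC2 rest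
  | _ => []
def pvC3 : List Int → List Int
  | _ :: _ :: c :: d :: _ :: f :: g :: rest => pvNorm c :: pvNorm d :: pvNorm f :: pvNorm g :: pvC3 rest
  | _ => []

theorem pv_seven_chunk {toks : List Int} {n : Nat} (h : toks.length = 7 * (n + 1)) :
    ∃ a b c d e f g rest, toks = a :: b :: c :: d :: e :: f :: g :: rest ∧ rest.length = 7 * n := by
  rcases toks with _ | ⟨a, _ | ⟨b, _ | ⟨c, _ | ⟨d, _ | ⟨e, _ | ⟨f, _ | ⟨g, rest⟩⟩⟩⟩⟩⟩⟩ <;>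
    simp [List.length] at h
  all_goals try omega
  exact ⟨a, b, c, d, e, f, g, rest, rfl, by omega⟩

theorem pv_filterMap_eq_map {α β : Type} (g : α → β) (l : List α) (f : α → Option β)
    (h : ∀ x ∈ l, f x = some (g x)) : l.filterMap f = l.map g := by
  induction l with
  | nil => rfl
  | cons x xs ih =>
    simp [h x (by simp), ih (fun y hy => h y (by simp [hy]))]

theorem pv_stride7 (vals : List Int) (n : Nat) (h : vals.length = 7 * n) (k : Nat) (hk : k < 7) :
    pvStride vals (k : Int) = (List.range n).map (fun j => vals.getD (k + 7 * j) 0) := by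
  unfold pvStride PySem.List.slice? PySem.List.sliceIndices
  norm_num [h]
  have hk0 : ¬((k:Int) < 0) := by omega
  cases n with
  | zero => simp [hk0]
  | succ m =>
    have hmin : min (k:Int) (7 * ((m+1 : Nat):Int)) = (k:Int) := by
      apply min_eq_left; push_cast; omega
    have hlt : (k:Int) < 7 * ((m+1 : Nat):Int) := by push_cast; omega
    have hcount : (((7 * ((m+1:Nat):Int) - (k:Int)) + 7 - 1) / 7).toNat = m + 1 := by
      push_cast; omega
    simp only [hk0, if_false, hmin, hlt, if_true, hcount]
    apply pv_filterMap_eq_map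
    intro x hx
    have hxlt : x < m + 1 := List.mem_range.mp hx
    have hidx : ((k:Int) + 7 * (x:Int)).toNat = k + 7 * x := by omega
    have hin : k + 7 * x < vals.length := by rw [h]; omega
    rw [hidx, List.getElem?_eq_getElem hin]
    rfl

theorem pv_stride7i (vals : List Int) (n : Nat) (h : vals.length = 7 * n) (k : Int)
    (h0 : 0 ≤ k) (hk : k < 7) :
    pvStride vals k = (List.range n).map (fun j => vals.getD (k.toNat + 7 * j) 0) := by
  obtain ⟨k', rfl⟩ := Int.eq_ofNat_of_zero_le h0
  simpa using pv_stride7 vals n h k' (by omega)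

theorem pv_getD7 (a b c d e f g : Int) (rest : List Int) (m : Nat) :
    (a :: b :: c :: d :: e :: f :: g :: rest).getD (m + 7) 0 = rest.getD m 0 := by
  simp [show m + 7 = m+1+1+1+1+1+1+1 from by ring]

theorem pv_stride_cons7 (v0 v1 v2 v3 v4 v5 v6 : Int) (rest : List Int) (n : Nat)
    (h : rest.length = 7 * n) (k : Int) (h0 : 0 ≤ k) (hk : k < 7) :
    pvStride (v0 :: v1 :: v2 :: v3 :: v4 :: v5 :: v6 :: rest) k =
      (v0 :: v1 :: v2 :: v3 :: v4 :: v5 :: v6 :: rest).getD k.toNat 0 :: pvStride rest k := by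
  rw [pv_stride7i _ (n+1) (by simp [h]; ring) k h0 hk, pv_stride7i _ n h k h0 hk,
      List.range_succ_eq_map]
  simp only [List.map_cons, List.map_map, Nat.mul_zero, Nat.add_zero]
  refine congrArg₂ _ rfl ?_
  apply List.map_congr_left
  intro j hj
  have : k.toNat + 7 * (j + 1) = (k.toNat + 7 * j) + 7 := by ring
  simp only [Function.comp, this, pv_getD7]

theorem pv_stride_nil (k : Int) (h0 : 0 ≤ k) (hk : k < 7) : pvStride ([] : List Int) k = [] := by
  simp [pv_stride7i [] 0 rfl k h0 hk]

theorem pv_B_l1 (toks : List Int) (n : Nat) (h : toks.length = 7 * n) :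
    pvStride (toks.map pvNorm) 0 = pvC1 toks := by
  induction n generalizing toks with
  | zero =>
    obtain rfl : toks = [] := List.length_eq_zero_iff.mp (by omega)
    simp [pv_stride_nil 0 (by norm_num) (by norm_num), pvC1]
  | succ m ih =>
    obtain ⟨a, b, c, d, e, f, g, rest, rfl, hr⟩ := pv_seven_chunk h
    simp only [List.map_cons]
    rw [pv_stride_cons7 _ _ _ _ _ _ _ _ m (by simp [hr]) 0 (by norm_num) (by norm_num)]
    simp [pvC1, ih rest hr]

theorem pv_B_l2 (toks : List Int) (n : Nat) (h : toks.length = 7 * n) :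
    ((pvStride (toks.map pvNorm) 1).zip (pvStride (toks.map pvNorm) 4)).flatMap
      (fun p => [p.1, p.2]) = pvC2 toks := by
  induction n generalizing toks with
  | zero =>
    obtain rfl : toks = [] := List.length_eq_zero_iff.mp (by omega)
    simp [pv_stride_nil 1 (by norm_num) (by norm_num), pvC2]
  | succ m ih =>
    obtain ⟨a, b, c, d, e, f, g, rest, rfl, hr⟩ := pv_seven_chunk h
    simp only [List.map_cons]
    rw [pv_stride_cons7 _ _ _ _ _ _ _ _ m (by simp [hr]) 1 (by norm_num) (by norm_num),
        pv_stride_cons7 _ _ _ _ _ _ _ _ m (by simp [hr]) 4 (by norm_num) (by norm_num)]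
    simp [pvC2, List.getD, ih rest hr]

theorem pv_B_l3 (toks : List Int) (n : Nat) (h : toks.length = 7 * n) :
    ((pvStride (toks.map pvNorm) 2).zip ((pvStride (toks.map pvNorm) 3).zip
        ((pvStride (toks.map pvNorm) 5).zip (pvStride (toks.map pvNorm) 6)))).flatMap
      (fun q => [q.1, q.2.1, q.2.2.1, q.2.2.2]) = pvC3 toks := by
  induction n generalizing toks with
  | zero =>
    obtain rfl : toks = [] := List.length_eq_zero_iff.mp (by omega)
    simp [pv_stride_nil 2 (by norm_num) (by norm_num), pvC3]
  | succ m ih =>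
    obtain ⟨a, b, c, d, e, f, g, rest, rfl, hr⟩ := pv_seven_chunk h
    simp only [List.map_cons]
    rw [pv_stride_cons7 _ _ _ _ _ _ _ _ m (by simp [hr]) 2 (by norm_num) (by norm_num),
        pv_stride_cons7 _ _ _ _ _ _ _ _ m (by simp [hr]) 3 (by norm_num) (by norm_num),
        pv_stride_cons7 _ _ _ _ _ _ _ _ m (by simp [hr]) 5 (by norm_num) (by norm_num),
        pv_stride_cons7 _ _ _ _ _ _ _ _ m (by simp [hr]) 6 (by norm_num) (by norm_num)]
    simp [pvC3, List.getD, ih rest hr]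

theorem pv_A_loop (toks : List Int) (n : Nat) (h : toks.length = 7 * n)
    (acc : List Int × List Int × List Int) :
    (PySem.List.pyRange 0 (n : Int) 1).foldl
      (fun (acc : List Int × List Int × List Int) i =>
        let slots := PySem.List.slice toks (some (i * 7)) (some ((i + 1) * 7))
        (acc.1 ++ [PySem.Int.mod (PySem.List.pyGetD slots 0 0 - 128266) 4096],
         acc.2.1 ++ [PySem.Int.mod (PySem.List.pyGetD slots 1 0 - 128266) 4096,
                     PySem.Int.mod (PySem.List.pyGetD slots 4 0 - 128266) 4096],
         acc.2.2 ++ [PySem.Int.mod (PySem.List.pyGetD slots 2 0 - 128266) 4096,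
                     PySem.Int.mod (PySem.List.pyGetD slots 3 0 - 128266) 4096,
                     PySem.Int.mod (PySem.List.pyGetD slots 5 0 - 128266) 4096,
                     PySem.Int.mod (PySem.List.pyGetD slots 6 0 - 128266) 4096])) acc
    = (acc.1 ++ pvC1 toks, acc.2.1 ++ pvC2 toks, acc.2.2 ++ pvC3 toks) := by
  induction n generalizing toks acc with
  | zero =>
    obtain rfl : toks = [] := List.length_eq_zero_iff.mp (by omega)
    simp [PySem.List.pyRange_one_eq_nil (by norm_num : (0:Int) ≤ 0), pvC1, pvC2, pvC3]
  | succ m ih =>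
    obtain ⟨a, b, c, d, e, f, g, rest, rfl, hr⟩ := pv_seven_chunk h
    rw [PySem.List.pyRange_one_cons (by push_cast; omega : (0:Int) < ((m+1:Nat):Int))]
    rw [List.foldl_cons]
    -- the first iteration: slots = toks[0:7] = [a,b,c,d,e,f,g]
    have hsl0 : PySem.List.slice (a :: b :: c :: d :: e :: f :: g :: rest) (some ((0:Int) * 7)) (some (((0:Int) + 1) * 7)) = [a,b,c,d,e,f,g] := by
      norm_num
      rw [PySem.List.slice_to _ (by norm_num : (0:Int) ≤ 7)]
      simp [List.take_succ_cons]
    simp only [hsl0]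
    -- identify the remaining fold over range(1, m+1) on toks with the fold over range(0, m) on rest
    have hdrop : ∀ x : Nat, (a :: b :: c :: d :: e :: f :: g :: rest).drop (7 + 7*x) = rest.drop (7*x) := by
      intro x
      simp [show 7 + 7*x = 7*x+1+1+1+1+1+1+1 from by ring, List.drop_succ_cons]
    have hsl : ∀ x : Nat,
        PySem.List.slice (a :: b :: c :: d :: e :: f :: g :: rest) (some ((1 + (x:Int)) * 7)) (some ((1 + (x:Int) + 1) * 7))
        = PySem.List.slice rest (some ((0 + (x:Int)) * 7)) (some ((0 + (x:Int) + 1) * 7)) := by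
      intro x
      rw [show ((1 + (x:Int)) * 7) = ((7 + 7*x : Nat) : Int) from by push_cast; ring,
          show ((1 + (x:Int) + 1) * 7) = ((14 + 7*x : Nat) : Int) from by push_cast; ring,
          show ((0 + (x:Int)) * 7) = ((7*x : Nat) : Int) from by push_cast; ring,
          show ((0 + (x:Int) + 1) * 7) = ((7*x + 7 : Nat) : Int) from by push_cast; ring,
          PySem.List.slice_natCast, PySem.List.slice_natCast, hdrop x,
          show 14 + 7*x - (7 + 7*x) = 7 from by omega,
          show 7*x + 7 - 7*x = 7 from by omega]
    have hget : ∀ (v0 v1 v2 v3 v4 v5 v6 : Int) (k : Nat), k < 7 →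
        PySem.List.pyGetD [v0,v1,v2,v3,v4,v5,v6] (k:Int) 0 = [v0,v1,v2,v3,v4,v5,v6].getD k 0 := by
      intro v0 v1 v2 v3 v4 v5 v6 k hk
      interval_cases k <;> rfl
    push_cast
    rw [PySem.List.pyRange_one 1 ((m:Int)+1)]
    rw [show (((m:Int)+1) - 1).toNat = m from by omega]
    rw [List.foldl_map]
    simp only [hsl]
    have ih' := ih rest hr
      (acc.1 ++ [PySem.Int.mod (PySem.List.pyGetD [a,b,c,d,e,f,g] 0 0 - 128266) 4096],
       acc.2.1 ++ [PySem.Int.mod (PySem.List.pyGetD [a,b,c,d,e,f,g] 1 0 - 128266) 4096,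
                   PySem.Int.mod (PySem.List.pyGetD [a,b,c,d,e,f,g] 4 0 - 128266) 4096],
       acc.2.2 ++ [PySem.Int.mod (PySem.List.pyGetD [a,b,c,d,e,f,g] 2 0 - 128266) 4096,
                   PySem.Int.mod (PySem.List.pyGetD [a,b,c,d,e,f,g] 3 0 - 128266) 4096,
                   PySem.Int.mod (PySem.List.pyGetD [a,b,c,d,e,f,g] 5 0 - 128266) 4096,
                   PySem.Int.mod (PySem.List.pyGetD [a,b,c,d,e,f,g] 6 0 - 128266) 4096])
    rw [PySem.List.pyRange_one 0 (m:Int), show ((m:Int) - 0).toNat = m from by omega,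
        List.foldl_map] at ih'
    rw [ih']
    simp [pvC1, pvC2, pvC3, pvNorm, PySem.List.pyGetD, PySem.List.pyGet?, PySem.List.pyIdx?]

theorem pv_core (u : List Int) :
    (let frames : Int := PySem.Int.floordiv (u.length : Int) 7
     let t2 := PySem.List.slice u none (some (frames * 7))
     if frames = 0 then ([[], [], []] : List (List Int))
     else
       let st := (PySem.List.pyRange 0 frames 1).foldl
         (fun (acc : List Int × List Int × List Int) i =>
           let slots := PySem.List.slice t2 (some (i * 7)) (some ((i + 1) * 7))
           (acc.1 ++ [PySem.Int.mod (PySem.List.pyGetD slots 0 0 - 128266) 4096],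
            acc.2.1 ++ [PySem.Int.mod (PySem.List.pyGetD slots 1 0 - 128266) 4096,
                        PySem.Int.mod (PySem.List.pyGetD slots 4 0 - 128266) 4096],
            acc.2.2 ++ [PySem.Int.mod (PySem.List.pyGetD slots 2 0 - 128266) 4096,
                        PySem.Int.mod (PySem.List.pyGetD slots 3 0 - 128266) 4096,
                        PySem.Int.mod (PySem.List.pyGetD slots 5 0 - 128266) 4096,
                        PySem.Int.mod (PySem.List.pyGetD slots 6 0 - 128266) 4096]))
         ([], [], [])
       [st.1, st.2.1, st.2.2])
    = (let frames : Int := PySem.Int.floordiv (u.length : Int) 7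
       let vals := (PySem.List.slice u none (some (frames * 7))).map pvNorm
       let l2 := ((pvStride vals 1).zip (pvStride vals 4)).flatMap (fun p => [p.1, p.2])
       let l3 := ((pvStride vals 2).zip ((pvStride vals 3).zip ((pvStride vals 5).zip (pvStride vals 6)))).flatMap
                   (fun q => [q.1, q.2.1, q.2.2.1, q.2.2.2])
       [pvStride vals 0, l2, l3]) := by
  have hn : PySem.Int.floordiv ((u.length : Int)) 7 = ((u.length / 7 : Nat) : Int) := by
    rw [PySem.Int.floordiv_eq_ediv_of_pos (by norm_num : (0:Int) < 7)]
    omega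
  simp only [hn]
  set n := u.length / 7 with hdefn
  have hmul : ((n:Int)) * 7 = ((n*7 : Nat) : Int) := by push_cast; ring
  rw [hmul, PySem.List.slice_to_natCast]
  have hlen : (u.take (n*7)).length = 7*n := by
    simp [List.length_take]
    have : n*7 ≤ u.length := Nat.div_mul_le_self u.length 7
    omega
  by_cases h0 : n = 0
  · rw [h0]
    simp only [Nat.cast_zero, if_pos]
    have hnil : u.take (0*7) = [] := by simp
    rw [hnil]
    simp only [List.map_nil]
    rw [pv_stride_nil 0 (by norm_num) (by norm_num), pv_stride_nil 1 (by norm_num) (by norm_num),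
        pv_stride_nil 2 (by norm_num) (by norm_num), pv_stride_nil 3 (by norm_num) (by norm_num),
        pv_stride_nil 4 (by norm_num) (by norm_num), pv_stride_nil 5 (by norm_num) (by norm_num),
        pv_stride_nil 6 (by norm_num) (by norm_num)]
    simp
  · have h0' : ¬ (((n:Nat):Int) = 0) := by exact_mod_cast h0
    simp only [if_neg h0']
    rw [pv_A_loop (u.take (n*7)) n hlen ([], [], [])]
    rw [pv_B_l1 (u.take (n*7)) n hlen, pv_B_l2 (u.take (n*7)) n hlen, pv_B_l3 (u.take (n*7)) n hlen]
    simp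


-- ===== VERDICT (by name: the statement is the Claim_ definition above) =====
theorem unpack_snac_from_7_spec : Claim_equal_unpack_snac_from_7 := by
  intro snac_tokens _
  exact pv_core (if snac_tokens ≠ [] ∧ PySem.List.pyGetD snac_tokens (-1) 0 = 128258
                 then PySem.List.slice snac_tokens none (some (-1)) else snac_tokens)
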